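-- pv_equiv track=rewrite | github.com/rishikesha/ProgrammingProblems | Kattis/magicalcows.py | solve
-- ===== SOURCE A (Python) =====
-- from collections import Counter
--
-- def solve(counter : Counter, d : int, limit : int) -> int:
--     """
--     Simulate the problem for d days and give out the number of
--     farms at the end of d days. The raw formula is also pretty easy.
--     """
--     for i in range(d):
--         counter2 = Counter()
--         for k in counter.keys():
--             if 2 * k > limit:
--                 counter2[k] += 2 * counter[k]
--             else:
--                 counter2[2*k] += counter[k]
--         counter = counter2
--     return sum(counter.values())
-- ===== SOURCE B (Python) =====
-- def solve(counter, d, limit):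
--     """
--     Closed form per farm size: a farm of size k doubles in size each day while
--     2*size <= limit; after the first day m on which 2*size > limit it splits,
--     doubling the farm count every remaining day.  So each key contributes
--     count * 2**(d - m) (or just count if it never splits within d days).
--     """
--     if d <= 0:
--         return sum(counter.values())
--     total = 0
--     for k, c in counter.items():
--         if k <= 0:
--             total += c * 2 ** d if 2 * k > limit else c
--         else:
--             kk, m = k, 0
--             while 2 * kk <= limit and m < d:
--                 kk *= 2
--                 m += 1
--             total += c * 2 ** (d - m) if 2 * kk > limit else c
--     return total
-- ===== Notes on version B (the rewrite author's own statement) =====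
-- stated objective: faster
-- what changed: Replaces A's day-by-day simulation of the whole counter (building a fresh Counter each of the d days) by a per-key closed form: for each farm size k find its first split day m with a doubling loop (at most log2(limit) steps) and add count * 2**(d - m), or count if it never splits within d days; Pre_ only excludes association lists with duplicate keys, which do not represent a Python Counter.
import Mathlib
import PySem

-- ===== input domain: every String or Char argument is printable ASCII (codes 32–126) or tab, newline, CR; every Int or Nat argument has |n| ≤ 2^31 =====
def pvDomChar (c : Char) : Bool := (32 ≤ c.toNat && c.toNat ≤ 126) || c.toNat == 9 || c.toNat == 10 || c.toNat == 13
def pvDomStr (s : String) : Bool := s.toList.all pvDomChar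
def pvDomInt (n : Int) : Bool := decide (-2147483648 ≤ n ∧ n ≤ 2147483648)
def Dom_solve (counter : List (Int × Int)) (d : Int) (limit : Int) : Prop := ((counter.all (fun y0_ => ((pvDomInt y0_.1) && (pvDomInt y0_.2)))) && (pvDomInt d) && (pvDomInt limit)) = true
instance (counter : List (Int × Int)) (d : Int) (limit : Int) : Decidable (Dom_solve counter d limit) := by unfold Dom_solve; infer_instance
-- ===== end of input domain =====

-- B replaces A's day-by-day simulation of the counter by a per-key closed form
-- (first split day m, then contribution count * 2^(d-m)); objective: faster.

-- ===== PORT A =====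
-- one day of the simulation: the inner 'for k in counter.keys()' loop building counter2
def solveDay (c : PySem.Dict Int Int) (limit : Int) : PySem.Dict Int Int :=
  c.keys.foldl (fun c2 k =>
    if 2 * k > limit then c2.modify k 0 (· + 2 * c.getD k 0)
    else c2.modify (2 * k) 0 (· + c.getD k 0)) PySem.Dict.empty

def solve (counter : List (Int × Int)) (d : Int) (limit : Int) : Int :=
  (((PySem.List.pyRange 0 d 1).foldl (fun c _ => solveDay c limit)
      (PySem.Dict.mk counter)).values).sum

-- ===== PORT B =====
-- the 'while 2*kk <= limit and m < d: kk *= 2; m += 1' loop of Source B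
def splitSteps (kk m d limit : Int) : Int × Int :=
  if 2 * kk ≤ limit ∧ m < d then splitSteps (2 * kk) (m + 1) d limit else (kk, m)
termination_by (d - m).toNat
decreasing_by omega

def solve_alt (counter : List (Int × Int)) (d : Int) (limit : Int) : Int :=
  if d ≤ 0 then (counter.map Prod.snd).sum
  else
    counter.foldl (fun total kc =>
      if kc.1 ≤ 0 then
        total + (if 2 * kc.1 > limit then kc.2 * 2 ^ d.toNat else kc.2)
      else
        let r := splitSteps kc.1 0 d limit
        total + (if 2 * r.1 > limit then kc.2 * 2 ^ (d - r.2).toNat else kc.2)) 0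

-- ===== PRECONDITION & SPEC =====
-- Pre_ excludes association lists with duplicate keys: they do not represent a
-- Python Counter/dict, so A's Python can never be called on them.
def Pre_solve (counter : List (Int × Int)) (d : Int) (limit : Int) : Prop :=
  (counter.map Prod.fst).Nodup

instance (counter : List (Int × Int)) (d : Int) (limit : Int) : Decidable (Pre_solve counter d limit) := by unfold Pre_solve; infer_instance

def pvWitness_solve : (List (Int × Int)) × Int × Int := ([(1, 3), (2, 4)], 3, 15)

def Spec_solve (counter : List (Int × Int)) (d : Int) (limit : Int) (out : Int) : Prop := out = solve_alt counter d limit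
instance (counter : List (Int × Int)) (d : Int) (limit : Int) (out : Int) : Decidable (Spec_solve counter d limit out) := by unfold Spec_solve; infer_instance

-- ===== CLAIM (what is proved, stated in full; the proofs are below) =====
def Claim_equal_solve : Prop := ∀ (counter : List (Int × Int)) (d : Int) (limit : Int), Dom_solve counter d limit → Pre_solve counter d limit → Spec_solve counter d limit (solve counter d limit)

-- ===== LEMMAS AND PROOFS =====

-- contribution of one farm of size k, count c, after n more days
def contrib (limit k c : Int) : Nat → Int
  | 0 => c
  | n + 1 => if 2 * k > limit then c * 2 ^ (n + 1) else contrib limit (2 * k) c n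

theorem contrib_split (limit k c : Int) (n : Nat) (h : 2 * k > limit) :
    contrib limit k c n = c * 2 ^ n := by
  cases n with
  | zero => simp [contrib]
  | succ n => simp [contrib, h]

theorem contrib_stuck (limit k c : Int) (n : Nat) (hk : k ≤ 0) (h : ¬ 2 * k > limit) :
    contrib limit k c n = c := by
  induction n generalizing k with
  | zero => rfl
  | succ n ih =>
      rw [contrib, if_neg h]
      exact ih (2 * k) (by omega) (by omega)

theorem contrib_add (limit k a b : Int) (n : Nat) :
    contrib limit k (a + b) n = contrib limit k a n + contrib limit k b n := by
  induction n generalizing k with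
  | zero => rfl
  | succ n ih =>
      simp only [contrib]
      split
      · ring
      · exact ih (2 * k)

-- Σ over a pair list of F applied to the pair
def pairSum (F : Int → Int → Int) (l : List (Int × Int)) : Int :=
  (l.map (fun p => F p.1 p.2)).sum

theorem pairSum_modify_list (F : Int → Int → Int)
    (hadd : ∀ k a b, F k (a + b) = F k a + F k b) (k a : Int) :
    ∀ (l : List (Int × Int)), (l.map Prod.fst).Nodup →
      pairSum F ((PySem.Dict.mk l).modify k 0 (· + a)).items = pairSum F l + F k a := by
  intro l
  induction l with
  | nil =>
      intro _
      simp [PySem.Dict.modify, PySem.Dict.insert, PySem.Dict.contains, PySem.Dict.getD,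
        PySem.Dict.get?, PySem.Dict.empty, pairSum]
  | cons p t ih =>
      intro hl
      have hl' : (t.map Prod.fst).Nodup := (List.nodup_cons.mp hl).2
      by_cases hpk : p.1 = k
      · -- head matches: k does not occur in t, so the replacing map fixes t
        have hknott : ∀ q ∈ t, q.1 ≠ k := by
          intro q hq
          have := (List.nodup_cons.mp hl).1
          intro hqk
          exact this (hpk ▸ hqk ▸ List.mem_map_of_mem hq)
        have hcont : (PySem.Dict.mk (p :: t)).contains k = true := by
          simp [PySem.Dict.contains, hpk]
        have hget : (PySem.Dict.mk (p :: t)).getD k 0 = p.2 := by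
          simp [PySem.Dict.getD, PySem.Dict.get?, hpk]
        have hmap : t.map (fun q => if q.1 == k then (k, p.2 + a) else q) = t := by
          have hcg := List.map_congr_left (l := t)
            (f := fun q : Int × Int => if q.1 == k then (k, p.2 + a) else q) (g := id)
            (fun q hq => by simp [hknott q hq])
          simpa using hcg
        simp only [PySem.Dict.modify, PySem.Dict.insert, hcont, hget, if_true]
        simp only [PySem.Dict.items, List.map_cons, hpk, beq_self_eq_true, if_true, hmap]
        simp only [pairSum, List.map_cons, List.sum_cons, hadd, ← hpk]
        ring
      · -- head does not match: the operation passes through the head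
        have hitems : ((PySem.Dict.mk (p :: t)).modify k 0 (· + a)).items
            = p :: ((PySem.Dict.mk t).modify k 0 (· + a)).items := by
          simp only [PySem.Dict.modify, PySem.Dict.insert, PySem.Dict.contains,
            PySem.Dict.getD, PySem.Dict.get?, PySem.Dict.items]
          by_cases hct : t.any (fun q => q.1 == k)
          · simp [hct, hpk]
          · simp [hct, hpk]
        rw [hitems]
        simp only [pairSum, List.map_cons, List.sum_cons] at *
        rw [ih hl']
        ring

theorem pairSum_modify (F : Int → Int → Int)
    (hadd : ∀ k a b, F k (a + b) = F k a + F k b)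
    (d : PySem.Dict Int Int) (hn : d.keys.Nodup) (k a : Int) :
    pairSum F (d.modify k 0 (· + a)).items = pairSum F d.items + F k a := by
  obtain ⟨l⟩ := d
  exact pairSum_modify_list F hadd k a l hn

theorem pairSum_foldl_modify (F : Int → Int → Int)
    (hadd : ∀ k a b, F k (a + b) = F k a + F k b)
    (g h : Int → Int) (l : List Int) (acc : PySem.Dict Int Int) (hn : acc.keys.Nodup) :
    pairSum F (l.foldl (fun c2 x => c2.modify (g x) 0 (· + h x)) acc).items
      = pairSum F acc.items + (l.map (fun x => F (g x) (h x))).sum := by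
  induction l generalizing acc with
  | nil => simp [pairSum]
  | cons x t ih =>
      simp only [List.foldl_cons, List.map_cons, List.sum_cons]
      rw [ih (acc.modify (g x) 0 (· + h x))
            (by rw [PySem.Dict.modify]; exact PySem.Dict.nodup_keys_insert _ _ _ hn),
          pairSum_modify F hadd acc hn (g x) (h x)]
      ring

-- solveDay's loop body written as a single modify with computed key and amount
theorem solveDay_eq (c : PySem.Dict Int Int) (limit : Int) :
    solveDay c limit = c.keys.foldl
      (fun c2 k => c2.modify (if 2 * k > limit then k else 2 * k) 0
        (· + (if 2 * k > limit then 2 * c.getD k 0 else c.getD k 0))) PySem.Dict.empty := by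
  unfold solveDay
  congr 1
  funext c2 k
  split <;> simp_all

theorem nodup_keys_solveDay (c : PySem.Dict Int Int) (limit : Int) :
    (solveDay c limit).keys.Nodup := by
  rw [solveDay_eq]
  exact PySem.Dict.nodup_keys_foldl_modify_key _ _ _ _ _ PySem.Dict.nodup_keys_empty

theorem pairSum_solveDay (dct : PySem.Dict Int Int) (limit : Int) (n : Nat)
    (hn : dct.keys.Nodup) :
    pairSum (fun k v => contrib limit k v n) (solveDay dct limit).items
      = pairSum (fun k v => contrib limit k v (n + 1)) dct.items := by
  rw [solveDay_eq,
      pairSum_foldl_modify _ (fun k a b => contrib_add limit k a b n) _ _ _ _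
        PySem.Dict.nodup_keys_empty]
  simp only [pairSum, PySem.Dict.items, PySem.Dict.empty, List.map_nil, List.sum_nil, zero_add]
  show ((dct.items.map (fun p => p.1)).map _).sum = _
  rw [List.map_map]
  apply congrArg
  apply List.map_congr_left
  intro p hp
  obtain ⟨k, v⟩ := p
  have hget : dct.getD k 0 = v := PySem.Dict.getD_of_mem_items dct hp hn 0
  simp only [Function.comp, hget, contrib]
  by_cases hsplit : 2 * k > limit
  · rw [if_pos hsplit, if_pos hsplit, if_pos hsplit, contrib_split _ _ _ _ hsplit]
    ring
  · rw [if_neg hsplit, if_neg hsplit, if_neg hsplit]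

theorem sum_foldl_days (limit : Int) (l : List Int) (dct : PySem.Dict Int Int)
    (hn : dct.keys.Nodup) :
    ((l.foldl (fun c _ => solveDay c limit) dct).values).sum
      = pairSum (fun k v => contrib limit k v l.length) dct.items := by
  induction l generalizing dct with
  | nil => simp [pairSum, PySem.Dict.values, contrib]
  | cons x t ih =>
      simp only [List.foldl_cons, List.length_cons]
      rw [ih (solveDay dct limit) (nodup_keys_solveDay dct limit),
          pairSum_solveDay dct limit t.length hn]

theorem contrib_splitSteps (d limit c : Int) :
    ∀ (n : Nat) (kk m : Int), (d - m).toNat = n → m ≤ d →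
      contrib limit kk c (d - m).toNat
        = (if 2 * (splitSteps kk m d limit).1 > limit then
            c * 2 ^ (d - (splitSteps kk m d limit).2).toNat else c) := by
  intro n
  induction n using Nat.strong_induction_on with
  | _ n ih =>
      intro kk m hnm hm
      rw [splitSteps]
      by_cases hc : 2 * kk ≤ limit ∧ m < d
      · rw [if_pos hc]
        have hs : (d - m).toNat = (d - (m + 1)).toNat + 1 := by omega
        rw [hs, contrib, if_neg (by omega : ¬ 2 * kk > limit)]
        exact ih ((d - (m + 1)).toNat) (by omega) (2 * kk) (m + 1) rfl (by omega)
      · rw [if_neg hc]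
        by_cases hsp : 2 * kk > limit
        · rw [if_pos hsp]
          exact contrib_split _ _ _ _ hsp
        · rw [if_neg hsp]
          have h0 : (d - m).toNat = 0 := by omega
          rw [h0]
          rfl

theorem entry_eq (d limit k c : Int) (hd : 0 < d) :
    (if k ≤ 0 then (if 2 * k > limit then c * 2 ^ d.toNat else c)
     else
       let r := splitSteps k 0 d limit
       (if 2 * r.1 > limit then c * 2 ^ (d - r.2).toNat else c))
      = contrib limit k c d.toNat := by
  by_cases hk : k ≤ 0
  · rw [if_pos hk]
    by_cases hs : 2 * k > limit
    · rw [if_pos hs, contrib_split _ _ _ _ hs]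
    · rw [if_neg hs, contrib_stuck _ _ _ _ hk hs]
  · rw [if_neg hk]
    have h := contrib_splitSteps d limit c (d - 0).toNat k 0 rfl (by omega)
    simp only [sub_zero] at h
    exact h.symm

-- ===== VERDICT (by name: the statement is the Claim_ definition above) =====
theorem solve_spec : Claim_equal_solve := by
  intro counter d limit _ hpre
  unfold Spec_solve solve solve_alt
  have hn : (PySem.Dict.mk counter).keys.Nodup := hpre
  rw [sum_foldl_days limit _ _ hn, PySem.List.length_pyRange_one]
  by_cases hd : d ≤ 0
  · rw [if_pos hd]
    have : (d - 0).toNat = 0 := by omega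
    simp only [sub_zero] at this ⊢
    rw [this]
    simp [pairSum, contrib, PySem.Dict.items]
  · rw [if_neg hd]
    have hbody : (fun (total : Int) (kc : Int × Int) =>
        if kc.1 ≤ 0 then total + (if 2 * kc.1 > limit then kc.2 * 2 ^ d.toNat else kc.2)
        else
          let r := splitSteps kc.1 0 d limit
          total + (if 2 * r.1 > limit then kc.2 * 2 ^ (d - r.2).toNat else kc.2))
        = (fun (total : Int) (kc : Int × Int) => total +
            (if kc.1 ≤ 0 then (if 2 * kc.1 > limit then kc.2 * 2 ^ d.toNat else kc.2)
             else
               let r := splitSteps kc.1 0 d limit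
               (if 2 * r.1 > limit then kc.2 * 2 ^ (d - r.2).toNat else kc.2))) := by
      funext total kc
      by_cases h : kc.1 ≤ 0 <;> simp [h]
    rw [hbody, PySem.List.foldl_add counter _ 0]
    simp only [zero_add]
    have : (d - 0).toNat = d.toNat := by omega
    simp only [sub_zero] at this ⊢
    unfold pairSum
    apply congrArg
    apply List.map_congr_left
    intro p _
    exact (entry_eq d limit p.1 p.2 (by omega)).symm
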